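-- pv_equiv track=rewrite | github.com/AdityaAgarwal1812/common-data-definitions | src/validation/custom_validator.py | _check_duplicate_group_ids
-- ===== SOURCE A (Python) =====
-- def _check_duplicate_group_ids(protocol_groups):
--     """Check for duplicate protocol group IDs"""
--     errors = []
--     seen_ids = set()
--
--     for group in protocol_groups:
--         group_id = group.get('id')
--         if group_id in seen_ids:
--             errors.append(f"Duplicate protocol group ID: {group_id}")
--         else:
--             seen_ids.add(group_id)
--
--     return errors
-- ===== SOURCE B (Python) =====
-- def _check_duplicate_group_ids(protocol_groups):
--     """Check for duplicate protocol group IDs"""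
--     # Staged algorithm: everything left after deleting the FIRST occurrence of
--     # each distinct id is exactly the repeated occurrences, in their original order.
--     remaining = [g.get('id') for g in protocol_groups]
--     for gid in dict.fromkeys(remaining):
--         remaining.remove(gid)
--     return [f"Duplicate protocol group ID: {gid}" for gid in remaining]
-- ===== Notes on version B (the rewrite author's own statement) =====
-- stated objective: alternative
-- what changed: Instead of one pass with a mutable seen-set emitting an error per repeat, B materializes the ids, deletes the first occurrence of each distinct id (dict.fromkeys + list.remove), and maps the message over the leftover, which is exactly the repeated occurrences in order.
import Mathlib
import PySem

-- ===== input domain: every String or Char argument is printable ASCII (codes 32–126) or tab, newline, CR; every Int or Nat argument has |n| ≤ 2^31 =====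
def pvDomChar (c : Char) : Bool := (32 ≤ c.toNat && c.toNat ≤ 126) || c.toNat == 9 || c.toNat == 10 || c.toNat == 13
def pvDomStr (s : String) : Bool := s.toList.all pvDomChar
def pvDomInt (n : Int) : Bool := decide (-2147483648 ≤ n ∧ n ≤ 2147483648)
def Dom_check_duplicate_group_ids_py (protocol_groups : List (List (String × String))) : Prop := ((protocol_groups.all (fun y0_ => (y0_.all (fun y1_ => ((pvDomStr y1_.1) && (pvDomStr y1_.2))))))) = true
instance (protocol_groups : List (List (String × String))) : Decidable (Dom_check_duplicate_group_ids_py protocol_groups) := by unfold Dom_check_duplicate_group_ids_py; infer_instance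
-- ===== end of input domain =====

-- B trades A's single pass with a mutable seen-set for a staged algorithm: delete the first
-- occurrence of each distinct id from the ids list, then map the message over the leftover
-- (alternative decomposition, not faster); same return value.

-- f"Duplicate protocol group ID: {gid}" where gid is g.get('id') (str or None)
def pvMsg (g : Option String) : String :=
  "Duplicate protocol group ID: " ++ (match g with | none => "None" | some s => s)

-- ===== PORT A =====
def check_duplicate_group_ids_py (protocol_groups : List (List (String × String))) : List String :=
  (protocol_groups.foldl
    (fun (st : List String × PySem.Set (Option String)) group =>
      let group_id := (PySem.Dict.mk group).get? "id"
      if PySem.Set.contains st.2 group_id then (st.1 ++ [pvMsg group_id], st.2)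
      else (st.1, PySem.Set.add st.2 group_id))
    ([], PySem.Set.empty)).1

-- ===== PORT B =====
-- remaining.remove(gid): gid is drawn from the distinct elements of remaining, so list.remove
-- always finds it and Python's ValueError is unreachable; the `.getD rest` default never fires.
def check_duplicate_group_ids_py_alt (protocol_groups : List (List (String × String))) : List String :=
  let remaining := protocol_groups.map (fun g => (PySem.Dict.mk g).get? "id")
  let remaining :=
    (PySem.List.dedup remaining).foldl
      (fun rest gid => (PySem.List.remove? rest gid).getD rest) remaining
  remaining.map pvMsg

-- ===== PRECONDITION & SPEC =====
def Spec_check_duplicate_group_ids_py (protocol_groups : List (List (String × String))) (out : List String) : Prop := out = check_duplicate_group_ids_py_alt protocol_groups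
instance (protocol_groups : List (List (String × String))) (out : List String) : Decidable (Spec_check_duplicate_group_ids_py protocol_groups out) := by unfold Spec_check_duplicate_group_ids_py; infer_instance

-- ===== CLAIM (what is proved, stated in full; the proofs are below) =====
def Claim_equal_check_duplicate_group_ids_py : Prop := ∀ (protocol_groups : List (List (String × String))), Dom_check_duplicate_group_ids_py protocol_groups → Spec_check_duplicate_group_ids_py protocol_groups (check_duplicate_group_ids_py protocol_groups)

-- ===== LEMMAS AND PROOFS =====

-- common specification: the ids of `rest` that already occur in the seen prefix `pre`
def pvDups (pre rest : List (Option String)) : List (Option String) :=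
  match rest with
  | [] => []
  | x :: r => if x ∈ pre then x :: pvDups pre r else pvDups (pre ++ [x]) r

-- ordered first occurrences of `rest` that are not in `pre` (pvDedup [] l = PySem.List.dedup l)
def pvDedup (pre rest : List (Option String)) : List (Option String) :=
  match rest with
  | [] => []
  | x :: r => if x ∈ pre then pvDedup pre r else x :: pvDedup (pre ++ [x]) r

theorem pvA_go (rest : List (Option String)) : ∀ (pre : List (Option String)) (errs : List String),
    (rest.foldl
      (fun (st : List String × PySem.Set (Option String)) gid =>
        if PySem.Set.contains st.2 gid then (st.1 ++ [pvMsg gid], st.2)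
        else (st.1, PySem.Set.add st.2 gid))
      (errs, PySem.Set.ofList pre)).1 = errs ++ (pvDups pre rest).map pvMsg := by
  induction rest with
  | nil => intro pre errs; simp [pvDups]
  | cons x r ih =>
    intro pre errs
    simp only [List.foldl_cons, pvDups]
    by_cases hx : x ∈ pre
    · have hc : PySem.Set.contains (PySem.Set.ofList pre) x = true := by
        rw [PySem.Set.contains_iff, PySem.Set.mem_ofList]; exact hx
      rw [if_pos hc]
      have := ih pre (errs ++ [pvMsg x])
      simp only [this, if_pos hx]
      simp
    · have hc : PySem.Set.contains (PySem.Set.ofList pre) x = false := by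
        simp only [Bool.eq_false_iff, Ne, PySem.Set.contains_iff, PySem.Set.mem_ofList]
        exact hx
      rw [if_neg (by simpa using hx)]
      have := ih (pre ++ [x]) errs
      rw [PySem.Set.ofList_append_singleton] at this
      have hadd : PySem.Set.add (PySem.Set.ofList pre) x = (PySem.Set.ofList pre).add x := rfl
      rw [hadd, this]
      simp [if_neg hx]

-- PySem.List.dedup, generalized to a running prefix: folding Set.add extends by pvDedup
theorem pvDedup_ofList (rest : List (Option String)) : ∀ (pre : List (Option String)),
    rest.foldl PySem.Set.add pre = pre ++ pvDedup pre rest := by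
  induction rest with
  | nil => intro pre; simp [pvDedup]
  | cons x r ih =>
    intro pre
    simp only [List.foldl_cons, pvDedup]
    by_cases hx : x ∈ pre
    · have : PySem.Set.add pre x = pre := by
        unfold PySem.Set.add
        rw [if_pos (by rw [PySem.Set.contains_iff]; exact hx)]
      rw [this, ih pre, if_pos hx]
    · have : PySem.Set.add pre x = pre ++ [x] := by
        unfold PySem.Set.add
        rw [if_neg (by simp only [PySem.Set.contains_iff]; simpa using hx)]
      rw [this, ih (pre ++ [x]), if_neg hx]
      simp

-- elements of pvDedup pre rest are never in pre
theorem pvDedup_not_mem (rest : List (Option String)) : ∀ (pre : List (Option String)) (y : Option String),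
    y ∈ pvDedup pre rest → y ∉ pre := by
  induction rest with
  | nil => intro pre y h; simp [pvDedup] at h
  | cons x r ih =>
    intro pre y h
    simp only [pvDedup] at h
    by_cases hx : x ∈ pre
    · rw [if_pos hx] at h; exact ih pre y h
    · rw [if_neg hx] at h
      rcases List.mem_cons.mp h with h | h
      · subst h; exact hx
      · intro hy; exact ih (pre ++ [x]) y h (by simp [hy])

-- removing an element absent from the head commutes with cons
theorem pvFold_remove_cons (ds : List (Option String)) :
    ∀ (x : Option String) (rest : List (Option String)), x ∉ ds →
    ds.foldl (fun rest gid => (PySem.List.remove? rest gid).getD rest) (x :: rest)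
      = x :: ds.foldl (fun rest gid => (PySem.List.remove? rest gid).getD rest) rest := by
  induction ds with
  | nil => intro x rest _; rfl
  | cons d ds ih =>
    intro x rest hx
    have hne : x ≠ d := fun h => hx (by simp [h])
    simp only [List.foldl_cons, PySem.List.remove?_cons_of_ne _ hne]
    rw [← ih x ((PySem.List.remove? rest d).getD rest) (fun h => hx (by simp [h]))]
    cases PySem.List.remove? rest d <;> rfl

-- B's staged removal computes pvDups
theorem pvB_go (rest : List (Option String)) : ∀ (pre : List (Option String)),
    (pvDedup pre rest).foldl (fun r gid => (PySem.List.remove? r gid).getD r) rest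
      = pvDups pre rest := by
  induction rest with
  | nil => intro pre; simp [pvDedup, pvDups]
  | cons x r ih =>
    intro pre
    simp only [pvDedup, pvDups]
    by_cases hx : x ∈ pre
    · rw [if_pos hx, if_pos hx]
      rw [pvFold_remove_cons _ x r (fun h => pvDedup_not_mem r pre x h hx)]
      rw [ih pre]
    · rw [if_neg hx, if_neg hx]
      simp only [List.foldl_cons, PySem.List.remove?_cons_self, Option.getD_some]
      exact ih (pre ++ [x])

-- ===== VERDICT (by name: the statement is the Claim_ definition above) =====
theorem check_duplicate_group_ids_py_spec : Claim_equal_check_duplicate_group_ids_py := by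
  intro pgs _
  unfold Spec_check_duplicate_group_ids_py check_duplicate_group_ids_py check_duplicate_group_ids_py_alt
  dsimp only
  rw [show (PySem.Set.empty : PySem.Set (Option String)) = PySem.Set.ofList [] from rfl,
     ← List.foldl_map (f := fun g => (PySem.Dict.mk g).get? "id")
        (g := fun (st : List String × PySem.Set (Option String)) gid =>
          if PySem.Set.contains st.2 gid then (st.1 ++ [pvMsg gid], st.2)
          else (st.1, PySem.Set.add st.2 gid))]
  rw [pvA_go]
  have hded : PySem.List.dedup (pgs.map (fun g => (PySem.Dict.mk g).get? "id"))
      = pvDedup [] (pgs.map (fun g => (PySem.Dict.mk g).get? "id")) := by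
    rw [PySem.List.dedup_eq_ofList]
    have := pvDedup_ofList (pgs.map (fun g => (PySem.Dict.mk g).get? "id")) []
    simpa [PySem.Set.ofList, PySem.Set.empty] using this
  rw [hded, pvB_go]
  simp
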